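-- pv_equiv track=rewrite | github.com/AdemHodzic/python-learning | Day #31/repeat.py | solution
-- ===== SOURCE A (Python) =====
-- def solution(string):
--
--     counter = len(string) - 1
--     current = string[0:counter]
--     while len(current) > 1:
--         if string.count(current) > 1:
--             return True
--         counter -= 1
--         current = string[0:counter]
--
--     return False
-- ===== SOURCE B (Python) =====
-- def solution(string):
--     # A prefix of length >= 2 repeats iff the 2-char prefix repeats (non-overlapping count),
--     # and A only looks at prefix lengths 2..len-1, which exist only when len >= 3.
--     return len(string) >= 3 and string.count(string[0:2]) > 1
-- ===== Notes on version B (the rewrite author's own statement) =====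
-- stated objective: faster
-- what changed: B replaces A's loop over all prefix lengths len-1..2 (each with an O(n) count scan) by a single count of the 2-character prefix plus a len>=3 guard, justified by monotonicity: a repeated longer prefix forces its 2-char prefix to repeat.
import Mathlib
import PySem

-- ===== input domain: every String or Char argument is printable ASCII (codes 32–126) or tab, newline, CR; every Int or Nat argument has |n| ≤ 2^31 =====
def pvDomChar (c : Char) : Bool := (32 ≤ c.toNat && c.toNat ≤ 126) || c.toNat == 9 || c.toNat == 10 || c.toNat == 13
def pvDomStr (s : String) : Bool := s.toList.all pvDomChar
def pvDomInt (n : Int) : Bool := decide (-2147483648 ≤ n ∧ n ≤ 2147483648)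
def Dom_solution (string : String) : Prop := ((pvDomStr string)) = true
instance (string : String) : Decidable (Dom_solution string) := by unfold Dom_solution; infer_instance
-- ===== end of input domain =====

-- B replaces A's quadratic scan over all prefix lengths by a single count of the 2-char
-- prefix (a longer prefix repeating forces the 2-char prefix to repeat); objective: faster.

-- ===== PORT A =====
-- the while-loop of A: current = string[0:counter]; check, then counter -= 1.
-- The loop runs at most counter+1 times (each iteration decrements counter and the guard
-- fails once the slice has length ≤ 1), so fuel (counter+1).toNat is always sufficient.
def solutionGo (string : List Char) (counter : Int) : Nat → Bool
  | 0 => false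
  | fuel + 1 =>
    let current := PySem.List.slice string (some 0) (some counter)
    if 1 < current.length then
      if 1 < PySem.Chars.count string current then true
      else solutionGo string (counter - 1) fuel
    else false

def solution (string : String) : Bool :=
  let counter : Int := PySem.Str.len string - 1
  solutionGo string.toList counter (counter + 1).toNat

-- ===== PORT B =====
def solution_alt (string : String) : Bool :=
  decide (3 ≤ PySem.Str.len string) &&
    decide (1 < PySem.Str.count string (PySem.Str.slice string (some 0) (some 2)))

-- ===== PRECONDITION & SPEC =====
def Spec_solution (string : String) (out : Bool) : Prop := out = solution_alt string
instance (string : String) (out : Bool) : Decidable (Spec_solution string out) := by unfold Spec_solution; infer_instance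

-- ===== CLAIM (what is proved, stated in full; the proofs are below) =====
def Claim_equal_solution : Prop := ∀ (string : String), Dom_solution string → Spec_solution string (solution string)

-- ===== LEMMAS AND PROOFS =====

-- a clean fuel-free version of PySem.Chars.count.go for a nonempty needle c :: qt
def cnt (c : Char) (qt : List Char) : List Char → Nat
  | [] => 0
  | h :: t =>
    if (c :: qt).isPrefixOf (h :: t) then cnt c qt (t.drop qt.length) + 1 else cnt c qt t
termination_by l => l.length
decreasing_by
  · simp only [List.length_drop, List.length_cons]; omega
  · simp

theorem go_eq_cnt (c : Char) (qt : List Char) :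
    ∀ (fuel : Nat) (l : List Char) (acc : Nat), l.length ≤ fuel →
      PySem.Chars.count.go (c :: qt) fuel l acc = acc + cnt c qt l := by
  intro fuel
  induction fuel with
  | zero =>
    intro l acc h
    have : l = [] := by cases l <;> simp_all
    subst this
    simp [PySem.Chars.count.go, cnt]
  | succ n ih =>
    intro l acc h
    cases l with
    | nil => simp [PySem.Chars.count.go, cnt]
    | cons hd t =>
      rw [PySem.Chars.count.go, cnt]
      split_ifs with hp
      · have hlen : (c :: qt).length ≤ (hd :: t).length := List.IsPrefix.length_le (List.isPrefixOf_iff_prefix.mp hp)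
        have : (List.drop (c :: qt).length (hd :: t)).length ≤ n := by
          simp only [List.length_drop, List.length_cons] at *; omega
        rw [ih _ _ this]
        have : List.drop (c :: qt).length (hd :: t) = t.drop qt.length := by simp
        rw [this]; omega
      · have : t.length ≤ n := by simp at h; omega
        rw [ih _ _ this]

theorem count_eq_cnt (c : Char) (qt : List Char) (s : List Char) :
    PySem.Chars.count s (c :: qt) = cnt c qt s := by
  rw [PySem.Chars.count]
  simp only [List.isEmpty_cons, if_neg Bool.false_ne_true]
  simpa using go_eq_cnt c qt s.length s 0 (le_refl _)

-- greedy count unrolls one step at a matching head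
theorem cnt_prefix (c : Char) (qt : List Char) (l : List Char)
    (h : (c :: qt) <+: l) : cnt c qt l = cnt c qt (l.drop (qt.length + 1)) + 1 := by
  cases l with
  | nil => simp at h
  | cons hd t =>
    rw [cnt.eq_def]
    simp only [if_pos (List.isPrefixOf_iff_prefix.mpr h)]
    rfl

theorem cnt_pos_of_infix (c : Char) (qt : List Char) (l : List Char)
    (h : (c :: qt) <:+: l) : 1 ≤ cnt c qt l := by
  induction l with
  | nil => simp at h
  | cons hd t ih =>
    rw [cnt.eq_def]
    simp only
    split_ifs with hp
    · omega
    · rcases List.infix_cons_iff.mp h with h1 | h2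
      · exact absurd (List.isPrefixOf_iff_prefix.mpr h1) (by simp [hp])
      · exact ih h2

theorem infix_of_cnt_pos (c : Char) (qt : List Char) :
    ∀ l : List Char, 1 ≤ cnt c qt l → (c :: qt) <:+: l := by
  intro l
  fun_induction cnt c qt l with
  | case1 => intro h; simp at h
  | case2 hd t hp ih =>
    intro _
    exact (List.isPrefixOf_iff_prefix.mp hp).isInfix
  | case3 hd t hp ih =>
    intro h
    exact (ih h).trans (List.suffix_cons hd t).isInfix

-- monotonicity: a repeating prefix of length k ≥ 2 forces the 2-char prefix to repeat
theorem count_take_mono (cs : List Char) (k : Nat) (hk : 2 ≤ k)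
    (h : 1 < PySem.Chars.count cs (cs.take k)) :
    1 < PySem.Chars.count cs (cs.take 2) := by
  by_cases hlen : cs.length ≤ 2
  · have : cs.take k = cs.take 2 := by
      rw [List.take_of_length_le hlen, List.take_of_length_le (by omega)]
    rwa [this] at h
  · rw [not_le] at hlen
    obtain ⟨a, b, rest, rfl⟩ : ∃ a b rest, cs = a :: b :: rest := by
      match cs, hlen with
      | a :: b :: rest, _ => exact ⟨a, b, rest, rfl⟩
    set cs := a :: b :: rest with hcs
    -- q = cs.take k = a :: b :: rest.take (k-2)
    have hq : cs.take k = a :: b :: rest.take (k - 2) := by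
      rw [hcs]
      match k, hk with
      | (n + 2), _ => simp
    rw [hq, count_eq_cnt] at h
    -- cnt a (b :: rest.take (k-2)) cs ≥ 2, and q is a prefix of cs
    have hqpre : (a :: b :: rest.take (k - 2)) <+: cs := by
      rw [← hq]; exact List.take_prefix k cs
    have hstep := cnt_prefix a (b :: rest.take (k - 2)) cs hqpre
    rw [hstep] at h
    have h1 : 1 ≤ cnt a (b :: rest.take (k - 2)) (cs.drop ((b :: rest.take (k - 2)).length + 1)) := by omega
    have hinf : (a :: b :: rest.take (k - 2)) <:+: cs.drop ((b :: rest.take (k - 2)).length + 1) :=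
      infix_of_cnt_pos _ _ _ h1
    -- the 2-char prefix [a, b] is infix of cs.drop 2
    have hdrop : cs.drop ((b :: rest.take (k - 2)).length + 1) <:+ cs.drop 2 := by
      have heq : cs.drop ((b :: rest.take (k - 2)).length + 1) =
          (cs.drop 2).drop ((rest.take (k - 2)).length) := by
        rw [List.drop_drop]; congr 1; simp; omega
      rw [heq]
      exact List.drop_suffix _ _
    have hab : [a, b] <:+: cs.drop 2 := by
      have : [a, b] <+: (a :: b :: rest.take (k - 2)) := ⟨rest.take (k - 2), rfl⟩
      exact (this.isInfix.trans hinf).trans hdrop.isInfix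
    -- count of the 2-char prefix
    have htake2 : cs.take 2 = [a, b] := by rw [hcs]; rfl
    rw [htake2, count_eq_cnt]
    have hpre2 : [a, b] <+: cs := ⟨rest, by rw [hcs]; rfl⟩
    rw [cnt_prefix a [b] cs hpre2]
    have : cs.drop ([b].length + 1) = cs.drop 2 := by norm_num
    rw [this]
    have := cnt_pos_of_infix a [b] (cs.drop 2) hab
    omega

-- the loop, for 0 ≤ counter ≤ len - 1 and enough fuel, equals the 2-char-prefix test
theorem solutionGo_eq (cs : List Char) :
    ∀ (counter : Int), 0 ≤ counter → counter ≤ (cs.length : Int) - 1 →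
      ∀ (fuel : Nat), counter < (fuel : Int) →
      solutionGo cs counter fuel =
        (decide (2 ≤ counter) && decide (1 < PySem.Chars.count cs (cs.take 2))) := by
  intro counter h0
  induction counter, h0 using Int.le_induction with
  | base =>
    intro _ fuel hf
    cases fuel with
    | zero => simp at hf
    | succ f =>
      rw [solutionGo]
      simp only [PySem.List.slice_zero_start]
      rw [PySem.List.slice_to cs (by norm_num : (0:Int) ≤ 0)]
      simp
  | succ n hn ih =>
    intro hle fuel hf
    cases fuel with
    | zero => exact absurd hf (by omega)
    | succ f =>
      rw [solutionGo]
      have hclamp : PySem.List.clampIdx cs.length (n + 1) = (n + 1).toNat := by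
        simp only [PySem.List.clampIdx]
        rw [if_neg (by omega)]
        omega
      have hslice : PySem.List.slice cs (some 0) (some (n + 1)) = cs.take (n + 1).toNat := by
        rw [PySem.List.slice_toNat cs (by omega) (by omega)]
        simp
      simp only [hslice, List.length_take]
      split_ifs with h1 h2
      · -- count of the long prefix exceeded 1: RHS is true too, via monotonicity
        have hk2 : 2 ≤ (n + 1).toNat := by omega
        have := count_take_mono cs (n + 1).toNat hk2 h2
        have h2le : (2 : Int) ≤ n + 1 := by omega
        simp [h2le, this]
      · -- recurse
        rw [show n + 1 - 1 = n by ring, ih (by omega) f (by omega)]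
        by_cases hn2 : (2 : Int) ≤ n
        · simp [hn2, (show (2:Int) ≤ n + 1 by omega)]
        · -- n + 1 = 2 (since the loop ran): the failed check IS the 2-char test
          have hn1 : n = 1 := by omega
          subst hn1
          have : ((1:Int) + 1).toNat = 2 := by decide
          rw [this] at h2
          simp only [(show ¬ (2:Int) ≤ 1 by decide), decide_false, Bool.false_and]
          simp
          omega
      · -- loop guard false: min (n+1).toNat len ≤ 1, so n + 1 ≤ 1 (as counter ≤ len - 1)
        have : ¬ (2 : Int) ≤ n + 1 := by omega
        simp [this]

theorem solution_eq (string : String) : solution string = solution_alt string := by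
  unfold solution solution_alt
  rw [PySem.Str.len_eq, PySem.Str.count_eq, PySem.Str.toList_slice]
  set cs := string.toList with hcs
  have hslice2 : PySem.Chars.slice cs (some 0) (some 2) = cs.take 2 := by
    rw [PySem.Chars.slice_eq_listSlice, PySem.List.slice_toNat cs (by omega) (by omega)]
    simp
  rw [hslice2]
  by_cases h0 : cs = []
  · rw [h0]
    norm_num [solutionGo]
  · have hlen : 1 ≤ cs.length := List.length_pos_iff.mpr h0
    show solutionGo cs ((cs.length : Int) - 1) (((cs.length : Int) - 1) + 1).toNat =
      (decide (3 ≤ (cs.length : Int)) && decide (1 < PySem.Chars.count cs (cs.take 2)))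
    have hfuel : ((cs.length : Int) - 1 + 1).toNat = cs.length := by omega
    rw [hfuel, solutionGo_eq cs ((cs.length : Int) - 1) (by omega) (by omega) cs.length (by omega)]
    by_cases h3 : 3 ≤ (cs.length : Int)
    · simp [h3, (show (2:Int) ≤ (cs.length : Int) - 1 by omega)]
    · simp [h3, (show ¬ (2:Int) ≤ (cs.length : Int) - 1 by omega)]

-- ===== VERDICT (by name: the statement is the Claim_ definition above) =====
theorem solution_spec : Claim_equal_solution := by
  intro string _
  unfold Spec_solution
  exact solution_eq string
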